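-- pv_equiv track=rewrite | github.com/tawesoft/html5spec | parse.py | gen_elements
-- ===== SOURCE A (Python) =====
-- def gen_elements(element):
--     if element == "autonomous custom elements":
--         pass
--     elif ", " in element:
--         # e.g. h1, h2, h3, h4, h5, h6
--         for e in element.split(", "):
--             yield from gen_elements(e)
--     elif ";" in element:
--         for e in element.split(";"):
--             yield from gen_elements(e.strip())
--     elif " " in element:
--         # e.g. MathML math, SVG svg, ElementSpec element
--         yield element.split(" ")[1]
--     else:
--         yield element
-- ===== SOURCE B (Python) =====
-- def gen_elements(element):
--     # iterative DFS with an explicit LIFO stack instead of recursion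
--     stack = [element]
--     while stack:
--         s = stack.pop()
--         if s == "autonomous custom elements":
--             pass
--         elif ", " in s:
--             stack.extend(reversed(s.split(", ")))
--         elif ";" in s:
--             stack.extend(reversed([p.strip() for p in s.split(";")]))
--         elif " " in s:
--             yield s.split(" ")[1]
--         else:
--             yield s
-- ===== Notes on version B (the rewrite author's own statement) =====
-- stated objective: alternative
-- what changed: A's recursive generator (recursing into each split piece) is replaced by a single while loop over an explicit LIFO stack that pushes split pieces in reverse, preserving the left-to-right yield order.
import Mathlib
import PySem

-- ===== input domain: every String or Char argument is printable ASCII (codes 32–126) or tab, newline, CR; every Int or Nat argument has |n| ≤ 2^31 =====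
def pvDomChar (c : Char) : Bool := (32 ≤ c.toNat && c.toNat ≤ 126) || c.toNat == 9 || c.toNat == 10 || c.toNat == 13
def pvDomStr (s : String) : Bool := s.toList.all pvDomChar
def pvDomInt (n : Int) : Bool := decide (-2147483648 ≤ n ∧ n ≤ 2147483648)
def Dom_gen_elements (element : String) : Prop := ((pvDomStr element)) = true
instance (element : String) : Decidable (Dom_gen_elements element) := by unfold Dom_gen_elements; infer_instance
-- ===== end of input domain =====

-- B replaces A's recursive generator by an explicit LIFO-stack loop (same yield order, no recursion); objective: alternative decomposition.

-- ===== PORT A =====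
-- A's generator, consumed as a list.  The recursion is ported with a fuel
-- counter (a totality guard only): element.length + 3 always suffices, since
-- split pieces never contain the separator, so the recursion depth is ≤ 3
-- (proved in the lemmas below).
def genARec : Nat → List Char → List String
  | 0, _ => []
  | fuel+1, e =>
    if e = "autonomous custom elements".toList then []
    else if PySem.Chars.isIn [',', ' '] e then
      (PySem.Chars.splitOn e [',', ' ']).flatMap (fun p => genARec fuel p)
    else if PySem.Chars.isIn [';'] e then
      (PySem.Chars.splitOn e [';']).flatMap (fun p => genARec fuel (PySem.Chars.strip p))
    else if PySem.Chars.isIn [' '] e then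
      -- element.split(" ")[1]: index 1 always exists here since " " ∈ e, so the getD default is unreachable
      [String.ofList (PySem.List.pyGetD (PySem.Chars.splitOn e [' ']) 1 [])]
    else [String.ofList e]

def gen_elements (element : String) : List String :=
  genARec (element.toList.length + 3) element.toList

-- ===== PORT B =====
-- Source B's while-loop over a LIFO stack; the stack is modelled head-is-top, so
-- 'pop(); extend(reversed(pieces))' becomes 'pieces ++ rest'.  Each loop
-- iteration consumes one unit of fuel; iterCount3 below is the exact number
-- of iterations (a termination bound for the while loop, proved sufficient
-- in the lemmas below).
def genBLoop : Nat → List (List Char) → List String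
  | 0, _ => []
  | _+1, [] => []
  | fuel+1, s :: rest =>
    if s = "autonomous custom elements".toList then genBLoop fuel rest
    else if PySem.Chars.isIn [',', ' '] s then
      genBLoop fuel (PySem.Chars.splitOn s [',', ' '] ++ rest)
    else if PySem.Chars.isIn [';'] s then
      genBLoop fuel ((PySem.Chars.splitOn s [';']).map PySem.Chars.strip ++ rest)
    else if PySem.Chars.isIn [' '] s then
      String.ofList (PySem.List.pyGetD (PySem.Chars.splitOn s [' ']) 1 []) :: genBLoop fuel rest
    else String.ofList s :: genBLoop fuel rest

-- loop iterations contributed by a stack entry that contains no ", "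
def iterCount2 (s : List Char) : Nat :=
  if s = "autonomous custom elements".toList then 1
  else if PySem.Chars.isIn [';'] s then 1 + (PySem.Chars.splitOn s [';']).length
  else 1

-- loop iterations for an arbitrary initial entry
def iterCount3 (s : List Char) : Nat :=
  if s = "autonomous custom elements".toList then 1
  else if PySem.Chars.isIn [',', ' '] s then
    1 + ((PySem.Chars.splitOn s [',', ' ']).map iterCount2).sum
  else iterCount2 s

def gen_elements_alt (element : String) : List String :=
  genBLoop (iterCount3 element.toList) [element.toList]

-- ===== PRECONDITION & SPEC =====
def Spec_gen_elements (element : String) (out : List String) : Prop := out = gen_elements_alt element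
instance (element : String) (out : List String) : Decidable (Spec_gen_elements element out) := by unfold Spec_gen_elements; infer_instance

-- ===== CLAIM (what is proved, stated in full; the proofs are below) =====
def Claim_equal_gen_elements : Prop := ∀ (element : String), Dom_gen_elements element → Spec_gen_elements element (gen_elements element)

-- ===== LEMMAS AND PROOFS =====

-- every element of splitOn.go's result is an accumulator entry or an infix of (cur.reverse ++ l)
lemma go_infix (sep : List Char) :
    ∀ fuel l cur acc (p : List Char), p ∈ PySem.Chars.splitOn.go sep fuel l cur acc →
      p ∈ acc ∨ p <:+: (cur.reverse ++ l) := by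
  intro fuel
  induction fuel with
  | zero =>
    intro l cur acc p hp
    simp [PySem.Chars.splitOn.go] at hp
    rcases hp with h | h
    · exact Or.inl h
    · exact Or.inr (h ▸ List.infix_refl _)
  | succ f ih =>
    intro l cur acc p hp
    cases l with
    | nil =>
      simp [PySem.Chars.splitOn.go] at hp
      rcases hp with h | h
      · exact Or.inl h
      · exact Or.inr (h ▸ (List.prefix_append _ _).isInfix)
    | cons c rest =>
      rw [PySem.Chars.splitOn.go] at hp
      split at hp
      · rcases ih _ _ _ _ hp with h | h
        · rcases List.mem_cons.mp h with h | h
          · exact Or.inr (h ▸ (List.prefix_append _ _).isInfix)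
          · exact Or.inl h
        · simp only [List.reverse_nil, List.nil_append] at h
          exact Or.inr (h.trans ((List.drop_suffix _ _).isInfix.trans (List.suffix_append _ _).isInfix))
      · rcases ih _ _ _ _ hp with h | h
        · exact Or.inl h
        · refine Or.inr ?_
          simpa using h

lemma infix_iff_drop (sub s : List Char) : sub <:+: s ↔ ∃ j, sub <+: s.drop j := by
  exact ((PySem.Chars.exists_prefix_drop_iff_isIn sub s).trans (PySem.Chars.isIn_iff_infix sub s)).symm

lemma not_infix_rev {sep cur : List Char} (hsep : sep ≠ [])
    (hcur : ∀ j, j < cur.length → ¬ sep <+: (cur.reverse.drop j ++ List.nil)) :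
    ¬ sep <:+: cur.reverse := by
  intro hc
  rcases (infix_iff_drop _ _).mp hc with ⟨j, hj⟩
  by_cases hlt : j < cur.length
  · exact hcur j hlt (by simpa using hj)
  · have : cur.reverse.drop j = [] := by
      apply List.drop_eq_nil_of_le; simp; omega
    rw [this] at hj
    exact hsep (List.prefix_nil.mp hj)

-- no element of splitOn.go's result (beyond acc) contains the nonempty separator
lemma go_no_sep (sep : List Char) (hsep : sep ≠ []) :
    ∀ fuel l cur acc, l.length < fuel →
      (∀ j, j < cur.length → ¬ sep <+: (cur.reverse.drop j ++ l)) →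
      (∀ p ∈ acc, ¬ sep <:+: p) →
      ∀ p ∈ PySem.Chars.splitOn.go sep fuel l cur acc, ¬ sep <:+: p := by
  intro fuel
  induction fuel with
  | zero => intro l cur acc hlen; omega
  | succ f ih =>
    intro l cur acc hlen hcur hacc p hp
    cases l with
    | nil =>
      simp [PySem.Chars.splitOn.go] at hp
      rcases hp with h | h
      · exact hacc p h
      · exact h ▸ not_infix_rev hsep (by simpa using hcur)
    | cons c rest =>
      rw [PySem.Chars.splitOn.go] at hp
      split at hp
      case isTrue hpre =>
        have hslen : 1 ≤ sep.length := by
          cases sep with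
          | nil => exact absurd rfl hsep
          | cons _ _ => simp
        refine ih _ _ _ ?_ ?_ ?_ p hp
        · simp at hlen ⊢; omega
        · intro j hj; simp at hj
        · intro q hq
          rcases List.mem_cons.mp hq with h | h
          · refine h ▸ not_infix_rev hsep ?_
            intro j hj hpj
            have hpj' : sep <+: cur.reverse.drop j := by simpa using hpj
            exact hcur j hj (hpj'.trans (List.prefix_append _ _))
          · exact hacc q h
      case isFalse hpre =>
        have hpre' : ¬ sep <+: (c :: rest) := fun hc => hpre (List.isPrefixOf_iff_prefix.mpr hc)
        refine ih _ _ _ ?_ ?_ hacc p hp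
        · simp at hlen ⊢; omega
        · intro j hj
          simp only [List.reverse_cons]
          rcases Nat.lt_succ_iff_lt_or_eq.mp (by simpa using hj) with hj' | hj'
          · have hdrop : (cur.reverse ++ [c]).drop j = cur.reverse.drop j ++ [c] := by
              rw [List.drop_append_of_le_length (by simpa using Nat.le_of_lt hj')]
            rw [hdrop, List.append_assoc]
            simpa using hcur j hj'
          · subst hj'
            have hdrop : (cur.reverse ++ [c]).drop cur.length = [c] := by
              have : cur.reverse.length = cur.length := by simp
              rw [List.drop_append_of_le_length (le_of_eq this.symm), List.drop_eq_nil_of_le (le_of_eq this)]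
              simp
            rw [hdrop]
            simpa using hpre'

lemma splitOn_mem_infix {s sep p : List Char} (h : p ∈ PySem.Chars.splitOn s sep) :
    p <:+: s := by
  unfold PySem.Chars.splitOn at h
  rcases go_infix sep _ s [] [] p h with h' | h'
  · simp at h'
  · simpa using h'

lemma splitOn_mem_no_sep {s sep p : List Char} (hsep : sep ≠ [])
    (h : p ∈ PySem.Chars.splitOn s sep) : ¬ sep <:+: p := by
  unfold PySem.Chars.splitOn at h
  exact go_no_sep sep hsep _ s [] [] (by omega) (by intro j hj; simp at hj) (by simp) p h

lemma strip_infix (p : List Char) : PySem.Chars.strip p <:+: p := by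
  unfold PySem.Chars.strip
  have h1 : PySem.Chars.lstrip p <:+ p := by
    unfold PySem.Chars.lstrip; exact List.dropWhile_suffix _
  have h2 : ∀ x : List Char, PySem.Chars.rstrip x <+: x := by
    intro x
    unfold PySem.Chars.rstrip
    have := List.dropWhile_suffix (l := x.reverse) PySem.Chars.isspace
    have h3 := (List.reverse_prefix (l₁ := List.dropWhile PySem.Chars.isspace x.reverse) (l₂ := x.reverse)).mpr this
    simpa using h3
  exact (h2 _).isInfix.trans h1.isInfix

lemma isIn_false_of_infix {sub s p : List Char} (h : PySem.Chars.isIn sub s = false)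
    (hp : p <:+: s) : PySem.Chars.isIn sub p = false := by
  rw [PySem.Chars.isIn_eq_false_iff] at h ⊢
  exact fun hc => h (hc.trans hp)

-- pieces of a ", "-split contain no ", "
lemma comma_piece_clean {s p : List Char} (hp : p ∈ PySem.Chars.splitOn s [',', ' ']) :
    PySem.Chars.isIn [',', ' '] p = false := by
  rw [PySem.Chars.isIn_eq_false_iff]
  exact splitOn_mem_no_sep (by decide) hp

-- stripped pieces of a ";"-split of a ", "-free string contain neither separator
lemma strip_piece_clean {s p : List Char} (hA : PySem.Chars.isIn [',', ' '] s = false)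
    (hp : p ∈ PySem.Chars.splitOn s [';']) :
    PySem.Chars.isIn [',', ' '] (PySem.Chars.strip p) = false ∧
      PySem.Chars.isIn [';'] (PySem.Chars.strip p) = false := by
  have h1 : PySem.Chars.strip p <:+: s := (strip_infix p).trans (splitOn_mem_infix hp)
  refine ⟨isIn_false_of_infix hA h1, ?_⟩
  rw [PySem.Chars.isIn_eq_false_iff]
  exact fun hc => splitOn_mem_no_sep (by decide) hp (hc.trans (strip_infix p))

-- one-step unfolding equations (control how far the fuel recursions unfold)
lemma genARec_succ (fuel : Nat) (e : List Char) :
    genARec (fuel+1) e =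
    if e = "autonomous custom elements".toList then []
    else if PySem.Chars.isIn [',', ' '] e then
      (PySem.Chars.splitOn e [',', ' ']).flatMap (fun p => genARec fuel p)
    else if PySem.Chars.isIn [';'] e then
      (PySem.Chars.splitOn e [';']).flatMap (fun p => genARec fuel (PySem.Chars.strip p))
    else if PySem.Chars.isIn [' '] e then
      [String.ofList (PySem.List.pyGetD (PySem.Chars.splitOn e [' ']) 1 [])]
    else [String.ofList e] := rfl

lemma genBLoop_succ (fuel : Nat) (s : List Char) (rest : List (List Char)) :
    genBLoop (fuel+1) (s :: rest) =
    if s = "autonomous custom elements".toList then genBLoop fuel rest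
    else if PySem.Chars.isIn [',', ' '] s then
      genBLoop fuel (PySem.Chars.splitOn s [',', ' '] ++ rest)
    else if PySem.Chars.isIn [';'] s then
      genBLoop fuel ((PySem.Chars.splitOn s [';']).map PySem.Chars.strip ++ rest)
    else if PySem.Chars.isIn [' '] s then
      String.ofList (PySem.List.pyGetD (PySem.Chars.splitOn s [' ']) 1 []) :: genBLoop fuel rest
    else String.ofList s :: genBLoop fuel rest := rfl

-- A-side fuel insensitivity, level by level
lemma genARec_fuel_leaf {s : List Char} (hA : PySem.Chars.isIn [',', ' '] s = false)
    (hB : PySem.Chars.isIn [';'] s = false) (n : Nat) :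
    genARec (n+1) s = genARec 1 s := by
  show genARec (n+1) s = genARec (0+1) s
  rw [genARec_succ, genARec_succ, hA, hB]
  simp

lemma genARec_fuel_two {s : List Char} (hA : PySem.Chars.isIn [',', ' '] s = false)
    (n : Nat) : genARec (n+2) s = genARec 2 s := by
  have hA' : ¬ (PySem.Chars.isIn [',', ' '] s = true) := by simp [hA]
  show genARec (n+1+1) s = genARec (1+1) s
  rw [genARec_succ, genARec_succ]
  by_cases hsp : s = "autonomous custom elements".toList
  · rw [if_pos hsp, if_pos hsp]
  · by_cases hB : PySem.Chars.isIn [';'] s = true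
    · rw [if_neg hsp, if_neg hsp, if_neg hA', if_neg hA', if_pos hB, if_pos hB]
      exact List.flatMap_congr (fun p hp => by
        rcases strip_piece_clean hA hp with ⟨h1, h2⟩
        exact genARec_fuel_leaf h1 h2 n)
    · rw [if_neg hsp, if_neg hsp, if_neg hA', if_neg hA', if_neg hB, if_neg hB]

lemma genARec_fuel_three (s : List Char) (n : Nat) : genARec (n+3) s = genARec 3 s := by
  show genARec (n+2+1) s = genARec (2+1) s
  rw [genARec_succ, genARec_succ]
  by_cases hsp : s = "autonomous custom elements".toList
  · rw [if_pos hsp, if_pos hsp]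
  · by_cases hA : PySem.Chars.isIn [',', ' '] s = true
    · rw [if_neg hsp, if_neg hsp, if_pos hA, if_pos hA]
      exact List.flatMap_congr (fun p hp => genARec_fuel_two (comma_piece_clean hp) n)
    · have hA' : PySem.Chars.isIn [',', ' '] s = false := by
        cases h : PySem.Chars.isIn [',', ' '] s
        · rfl
        · exact absurd h hA
      by_cases hB : PySem.Chars.isIn [';'] s = true
      · rw [if_neg hsp, if_neg hsp, if_neg hA, if_neg hA, if_pos hB, if_pos hB]
        exact List.flatMap_congr (fun p hp => by
          rcases strip_piece_clean hA' hp with ⟨h1, h2⟩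
          exact genARec_fuel_two h1 n)
      · rw [if_neg hsp, if_neg hsp, if_neg hA, if_neg hA, if_neg hB, if_neg hB]

-- B-side: exact fuel accounting, level by level
lemma genBLoop_leaf {s : List Char} (hA : PySem.Chars.isIn [',', ' '] s = false)
    (hB : PySem.Chars.isIn [';'] s = false) (n : Nat) (rest : List (List Char)) :
    genBLoop (n+1) (s :: rest) = genARec 1 s ++ genBLoop n rest := by
  have hA' : ¬ (PySem.Chars.isIn [',', ' '] s = true) := by simp [hA]
  have hB' : ¬ (PySem.Chars.isIn [';'] s = true) := by simp [hB]
  show genBLoop (n+1) (s :: rest) = genARec (0+1) s ++ genBLoop n rest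
  rw [genBLoop_succ, genARec_succ]
  by_cases hsp : s = "autonomous custom elements".toList
  · rw [if_pos hsp, if_pos hsp]; rfl
  · rw [if_neg hsp, if_neg hsp, if_neg hA', if_neg hA', if_neg hB', if_neg hB']
    by_cases hS : PySem.Chars.isIn [' '] s = true
    · rw [if_pos hS, if_pos hS]; rfl
    · rw [if_neg hS, if_neg hS]; rfl

lemma genBLoop_leaf_list {ps : List (List Char)}
    (h : ∀ p ∈ ps, PySem.Chars.isIn [',', ' '] p = false ∧ PySem.Chars.isIn [';'] p = false)
    (n : Nat) (rest : List (List Char)) :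
    genBLoop (n + ps.length) (ps ++ rest) = ps.flatMap (genARec 1) ++ genBLoop n rest := by
  induction ps with
  | nil => simp
  | cons p ps ih =>
    have hlen : n + (p :: ps).length = (n + ps.length) + 1 := by simp; omega
    rw [hlen, List.cons_append, genBLoop_leaf (h p (by simp)).1 (h p (by simp)).2,
      ih (fun q hq => h q (by simp [hq]))]
    simp

lemma genBLoop_two {s : List Char} (hA : PySem.Chars.isIn [',', ' '] s = false)
    (n : Nat) (rest : List (List Char)) :
    genBLoop (n + iterCount2 s) (s :: rest) = genARec 2 s ++ genBLoop n rest := by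
  have hA' : ¬ (PySem.Chars.isIn [',', ' '] s = true) := by simp [hA]
  by_cases hsp : s = "autonomous custom elements".toList
  · have hcnt : n + iterCount2 s = n + 1 := by simp [iterCount2, hsp]
    rw [hcnt]
    show genBLoop (n+1) (s :: rest) = genARec (1+1) s ++ genBLoop n rest
    rw [genBLoop_succ, genARec_succ, if_pos hsp, if_pos hsp]
    rfl
  · by_cases hB : PySem.Chars.isIn [';'] s = true
    · have hcnt : n + iterCount2 s = (n + (PySem.Chars.splitOn s [';']).length) + 1 := by
        simp only [iterCount2, if_neg hsp, if_pos hB]; omega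
      rw [hcnt]
      show genBLoop (_ + 1) (s :: rest) = genARec (1+1) s ++ genBLoop n rest
      rw [genBLoop_succ, genARec_succ, if_neg hsp, if_neg hsp, if_neg hA', if_neg hA',
        if_pos hB, if_pos hB]
      have hlen : (PySem.Chars.splitOn s [';']).length
          = ((PySem.Chars.splitOn s [';']).map PySem.Chars.strip).length := by simp
      rw [hlen, genBLoop_leaf_list (by
        intro q hq
        rcases List.mem_map.mp hq with ⟨p, hp, rfl⟩
        exact strip_piece_clean hA hp) n rest]
      rw [List.flatMap_map]
    · have hB' : PySem.Chars.isIn [';'] s = false := by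
        cases h : PySem.Chars.isIn [';'] s
        · rfl
        · exact absurd h hB
      have hcnt : n + iterCount2 s = n + 1 := by
        simp only [iterCount2, if_neg hsp, hB', Bool.false_eq_true, if_false]
      rw [hcnt, genBLoop_leaf hA hB' n rest]
      show genARec 1 s ++ genBLoop n rest = genARec (1+1) s ++ genBLoop n rest
      rw [genARec_fuel_leaf hA hB' 1]

lemma genBLoop_two_list {ps : List (List Char)}
    (h : ∀ p ∈ ps, PySem.Chars.isIn [',', ' '] p = false)
    (n : Nat) (rest : List (List Char)) :
    genBLoop (n + (ps.map iterCount2).sum) (ps ++ rest) = ps.flatMap (genARec 2) ++ genBLoop n rest := by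
  induction ps with
  | nil => simp
  | cons p ps ih =>
    have hlen : n + ((p :: ps).map iterCount2).sum = (n + (ps.map iterCount2).sum) + iterCount2 p := by
      simp; omega
    rw [hlen, List.cons_append, genBLoop_two (h p (by simp)),
      ih (fun q hq => h q (by simp [hq]))]
    simp

lemma genBLoop_three (s : List Char) (n : Nat) (rest : List (List Char)) :
    genBLoop (n + iterCount3 s) (s :: rest) = genARec 3 s ++ genBLoop n rest := by
  by_cases hsp : s = "autonomous custom elements".toList
  · have hcnt : n + iterCount3 s = n + 1 := by simp [iterCount3, hsp]
    rw [hcnt]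
    show genBLoop (n+1) (s :: rest) = genARec (2+1) s ++ genBLoop n rest
    rw [genBLoop_succ, genARec_succ, if_pos hsp, if_pos hsp]
    rfl
  · by_cases hA : PySem.Chars.isIn [',', ' '] s = true
    · have hcnt : n + iterCount3 s
          = (n + ((PySem.Chars.splitOn s [',', ' ']).map iterCount2).sum) + 1 := by
        simp only [iterCount3, if_neg hsp, if_pos hA]; omega
      rw [hcnt]
      show genBLoop (_ + 1) (s :: rest) = genARec (2+1) s ++ genBLoop n rest
      rw [genBLoop_succ, genARec_succ, if_neg hsp, if_neg hsp, if_pos hA, if_pos hA]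
      rw [genBLoop_two_list (fun q hq => comma_piece_clean hq) n rest]
    · have hA' : PySem.Chars.isIn [',', ' '] s = false := by
        cases h : PySem.Chars.isIn [',', ' '] s
        · rfl
        · exact absurd h hA
      have hcnt : n + iterCount3 s = n + iterCount2 s := by
        simp only [iterCount3, if_neg hsp, hA', Bool.false_eq_true, if_false]
      rw [hcnt, genBLoop_two hA' n rest]
      show genARec 2 s ++ genBLoop n rest = genARec (1+2) s ++ genBLoop n rest
      rw [genARec_fuel_two hA' 1]

-- ===== VERDICT (by name: the statement is the Claim_ definition above) =====
theorem gen_elements_spec : Claim_equal_gen_elements := by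
  intro element _
  unfold Spec_gen_elements gen_elements gen_elements_alt
  have hB := genBLoop_three element.toList 0 []
  simp only [Nat.zero_add] at hB
  rw [hB, genARec_fuel_three element.toList element.toList.length]
  simp [genBLoop]
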